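-- pv_equiv track=rewrite | github.com/Ben-Kandel/WF-Stats | demo-scraper/stuff.py | get_player_stats
-- ===== SOURCE A (Python) =====
-- from typing import List, Tuple, Dict
--
-- def get_player_stats(stats: List[int]) -> Dict[str, Tuple[int, int]]:
--     current_weapon = 0
--     answer = {}
--     weapon_list = ["gb", "mg", "rg", "gl", "rl", "pg", "lg", "eb"]
--     skip_next = False
--     for i in range(0, len(stats)-1):
--         if(skip_next):
--             skip_next = False
--             continue
--         shots_fired = stats[i]
--         shots_hit = stats[i+1]
--         if(shots_fired == 0): # this weapon wasn't used. record it and move on to the next pair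
--             answer[weapon_list[current_weapon]] = (0, 0)
--             current_weapon += 1
--         else:
--             answer[weapon_list[current_weapon]] = (shots_fired, shots_hit)
--             current_weapon += 1
--             skip_next = True
--     return answer
-- ===== SOURCE B (Python) =====
-- from typing import List, Tuple, Dict
--
-- def get_player_stats(stats: List[int]) -> Dict[str, Tuple[int, int]]:
--     # State-machine fold: no indexing, no skip flag. 'pending' holds the last
--     # unconsumed entry; a pending zero becomes an unused-weapon record (0, 0)
--     # as soon as another entry follows it, a pending nonzero pairs with the
--     # next entry. Pairs are collected first, then named in one zip.
--     pairs = []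
--     pending = None
--     for x in stats:
--         if pending is None:
--             pending = x
--         elif pending == 0:
--             pairs.append((0, 0))
--             pending = x
--         else:
--             pairs.append((pending, x))
--             pending = None
--     return dict(zip(["gb", "mg", "rg", "gl", "rl", "pg", "lg", "eb"], pairs))
-- ===== Notes on version B (the rewrite author's own statement) =====
-- stated objective: alternative
-- what changed: B replaces A's indexed loop (stats[i], stats[i+1], skip_next flag, dict writes inside the loop) by an index-free state-machine fold over the elements with an Optional pending value that emits (fired, hit) pairs, then names them in one zip at the end.
import Mathlib
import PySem

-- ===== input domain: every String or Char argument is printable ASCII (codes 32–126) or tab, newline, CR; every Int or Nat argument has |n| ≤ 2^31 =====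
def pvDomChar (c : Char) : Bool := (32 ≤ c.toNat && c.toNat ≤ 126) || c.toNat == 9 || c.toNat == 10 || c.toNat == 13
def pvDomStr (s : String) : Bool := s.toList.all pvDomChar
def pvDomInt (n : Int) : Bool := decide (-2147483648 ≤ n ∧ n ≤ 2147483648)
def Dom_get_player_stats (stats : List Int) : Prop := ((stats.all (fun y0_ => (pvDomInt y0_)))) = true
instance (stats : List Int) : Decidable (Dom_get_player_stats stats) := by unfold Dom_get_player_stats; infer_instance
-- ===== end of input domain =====

-- B replaces A's indexed skip-flag loop by an index-free pending-state fold that collects the pairs, then names them in one zip; return-value equivalence proved on Pre_ (at most 8 encoded records).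


-- ===== PORT A =====
def aWeaponList : List String := ["gb", "mg", "rg", "gl", "rl", "pg", "lg", "eb"]

-- the 'for i in range(0, len(stats)-1)' loop with state (current_weapon, skip_next, answer);
-- fuel = bound on remaining iterations (stats.length suffices)
def aLoop (stats : List Int) : Nat → Int → Int → Bool → PySem.Dict String (Int × Int) → PySem.Dict String (Int × Int)
  | 0, _, _, _, answer => answer
  | fuel+1, i, cw, skip, answer =>
    if i < PySem.List.len stats - 1 then
      if skip then aLoop stats fuel (i+1) cw false answer
      else
        let fired := PySem.List.pyGetD stats i 0
        let hit := PySem.List.pyGetD stats (i+1) 0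
        if fired = 0 then
          aLoop stats fuel (i+1) (cw+1) false (answer.insert (PySem.List.pyGetD aWeaponList cw "") (0, 0))
        else
          aLoop stats fuel (i+1) (cw+1) true (answer.insert (PySem.List.pyGetD aWeaponList cw "") (fired, hit))
    else answer

def get_player_stats (stats : List Int) : List (String × Int × Int) :=
  (aLoop stats stats.length 0 0 false PySem.Dict.empty).items

-- ===== PORT B =====
def bWeaponList : List String := ["gb", "mg", "rg", "gl", "rl", "pg", "lg", "eb"]

-- one step of B's pending-state machine: state = (pending entry, pairs collected so far)
def bStep (st : Option Int × List (Int × Int)) (x : Int) : Option Int × List (Int × Int) :=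
  match st with
  | (none, ps) => (some x, ps)
  | (some f, ps) => if f = 0 then (some x, ps ++ [((0 : Int), (0 : Int))]) else (none, ps ++ [(f, x)])

def get_player_stats_alt (stats : List Int) : List (String × Int × Int) :=
  List.zipWith (fun w p => (w, p.1, p.2)) bWeaponList (stats.foldl bStep (none, [])).2

-- ===== PRECONDITION & SPEC =====
-- number of per-weapon records stats encodes (a zero entry followed by anything is one
-- unused weapon, a nonzero entry starting a pair consumes two entries)
def recCount : List Int → Nat
  | [] => 0
  | [_] => 0
  | x :: y :: rest => if x = 0 then recCount (y :: rest) + 1 else recCount rest + 1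

-- A indexes weapon_list with the running record number, so it raises IndexError exactly
-- when stats encodes more than 8 records; Pre_ excludes exactly those raising inputs.
def Pre_get_player_stats (stats : List Int) : Prop := recCount stats ≤ 8
instance (stats : List Int) : Decidable (Pre_get_player_stats stats) := by unfold Pre_get_player_stats; infer_instance
def pvWitness_get_player_stats : List Int := [3, 2, 0, 5, 4]

def Spec_get_player_stats (stats : List Int) (out : List (String × Int × Int)) : Prop := out = get_player_stats_alt stats
instance (stats : List Int) (out : List (String × Int × Int)) : Decidable (Spec_get_player_stats stats out) := by unfold Spec_get_player_stats; infer_instance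

-- ===== CLAIM (what is proved, stated in full; the proofs are below) =====
def Claim_equal_get_player_stats : Prop := ∀ (stats : List Int), Dom_get_player_stats stats → Pre_get_player_stats stats → Spec_get_player_stats stats (get_player_stats stats)

-- ===== LEMMAS AND PROOFS =====

-- the pair accumulator factors out of the fold
lemma bStep_factor (l : List Int) : ∀ (s : Option Int) (ps : List (Int × Int)),
    (l.foldl bStep (s, ps)).2 = ps ++ (l.foldl bStep (s, [])).2 := by
  induction l with
  | nil => simp
  | cons x t ih =>
    intro s ps
    cases s with
    | none => simp only [List.foldl, bStep]; rw [ih (some x) ps]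
    | some f =>
      by_cases hf : f = 0
      · simp only [List.foldl, bStep, if_pos hf]
        rw [ih (some x) (ps ++ [((0:Int),(0:Int))]), ih (some x) ([] ++ [((0:Int),(0:Int))])]
        simp
      · simp only [List.foldl, bStep, if_neg hf]
        rw [ih none (ps ++ [(f, x)]), ih none ([] ++ [(f, x)])]
        simp

-- the parse of stats from an index, as B's fold produces it
def parseFrom (stats : List Int) (i : Nat) : List (Int × Int) :=
  ((stats.drop i).foldl bStep (none, [])).2

lemma parse_zero (y : Int) (rest : List Int) :
    (((0 : Int) :: y :: rest).foldl bStep (none, [])).2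
      = ((0 : Int), (0 : Int)) :: ((y :: rest).foldl bStep (none, [])).2 := by
  show ((y :: rest).foldl bStep (some 0, [])).2 = _
  simp only [List.foldl, bStep, if_true, List.nil_append]
  rw [bStep_factor rest (some y) [((0:Int),(0:Int))]]
  rfl

lemma parse_pair (x y : Int) (rest : List Int) (hx : x ≠ 0) :
    ((x :: y :: rest).foldl bStep (none, [])).2
      = (x, y) :: (rest.foldl bStep (none, [])).2 := by
  show ((y :: rest).foldl bStep (some x, [])).2 = _
  simp only [List.foldl, bStep, if_neg hx, List.nil_append]
  rw [bStep_factor rest none [(x, y)]]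
  rfl

lemma parse_short (l : List Int) (h : l.length ≤ 1) :
    (l.foldl bStep (none, [])).2 = [] := by
  match l, h with
  | [], _ => rfl
  | [x], _ => rfl

lemma parseFrom_length (stats : List Int) : ∀ i, (parseFrom stats i).length = recCount (stats.drop i) := by
  intro i
  unfold parseFrom
  generalize h : stats.drop i = l
  clear h i
  induction hn : l.length using Nat.strong_induction_on generalizing l with
  | _ n ihn =>
    match l with
    | [] => rfl
    | [x] => rfl
    | x :: y :: rest =>
      by_cases hx : x = 0
      · subst hx
        rw [parse_zero, recCount, if_pos rfl]
        simp only [List.length_cons]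
        rw [ihn (y :: rest).length (by simp at hn ⊢; omega) (y :: rest) rfl]
      · rw [parse_pair x y rest hx, recCount, if_neg hx]
        simp only [List.length_cons]
        rw [ihn rest.length (by simp at hn ⊢; omega) rest rfl]

lemma weapon_drop (c : Nat) (h : c < 8) :
    aWeaponList.drop c = aWeaponList.getD c "" :: aWeaponList.drop (c+1) := by
  interval_cases c <;> rfl

lemma weapon_take (c : Nat) (h : c < 8) :
    aWeaponList.take (c+1) = aWeaponList.take c ++ [aWeaponList.getD c ""] := by
  interval_cases c <;> rfl

lemma weapon_fresh (c : Nat) (h : c < 8) :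
    aWeaponList.getD c "" ∉ aWeaponList.take c := by
  interval_cases c <;> decide

lemma drop_two (stats : List Int) (i : Nat) (h : i + 1 < stats.length) :
    stats.drop i = stats.getD i 0 :: stats.getD (i+1) 0 :: stats.drop (i+2) := by
  rw [List.drop_eq_getElem_cons (by omega), List.drop_eq_getElem_cons (by omega : i + 1 < stats.length)]
  rw [List.getD_eq_getElem stats 0 (by omega), List.getD_eq_getElem stats 0 (by omega : i + 1 < stats.length)]

lemma aLoop_items (stats : List Int) :
    ∀ (fa : Nat) (i c : Nat) (answer : PySem.Dict String (Int × Int)),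
      stats.length ≤ fa + i →
      (∀ k ∈ answer.keys, k ∈ aWeaponList.take c) →
      c + (parseFrom stats i).length ≤ 8 →
      (aLoop stats fa (i : Int) (c : Int) false answer).items
        = answer.items ++ List.zipWith (fun w p => (w, p.1, p.2)) (aWeaponList.drop c) (parseFrom stats i) := by
  intro fa
  induction fa using Nat.strong_induction_on with
  | _ fa IH =>
    intro i c answer hfa hkeys hc
    by_cases hg : i + 1 < stats.length
    · cases fa with
      | zero => omega
      | succ fa' =>
        have hgi : (i : Int) < PySem.List.len stats - 1 := by
          simp only [PySem.List.len_eq]; omega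
        have hparse := drop_two stats i hg
        have hne : parseFrom stats i ≠ [] := by
          unfold parseFrom; rw [hparse]
          by_cases hz : stats.getD i 0 = 0
          · rw [hz, parse_zero]; simp
          · rw [parse_pair _ _ _ hz]; simp
        have hc8 : c < 8 := by
          have := List.length_pos_of_ne_nil hne; omega
        have hcontains : answer.contains (aWeaponList.getD c "") = false := by
          rcases hcon : answer.contains (aWeaponList.getD c "") with _ | _
          · rfl
          · exact absurd (hkeys _ ((PySem.Dict.contains_iff_mem_keys _ _).mp hcon)) (weapon_fresh c hc8)
        by_cases hz : stats.getD i 0 = 0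
        · -- zero entry: record (0, 0), advance one
          have hP : parseFrom stats i = ((0:Int),(0:Int)) :: parseFrom stats (i+1) := by
            unfold parseFrom
            rw [hparse, hz, parse_zero]
            congr 1
            rw [List.drop_eq_getElem_cons (by omega : i + 1 < stats.length),
                List.getD_eq_getElem stats 0 (by omega : i + 1 < stats.length)]
          have e1 : (i : Int) + 1 = ((i + 1 : Nat) : Int) := by push_cast; ring
          have e2 : (c : Int) + 1 = ((c + 1 : Nat) : Int) := by push_cast; ring
          have hins :
              (answer.insert (aWeaponList.getD c "") ((0:Int), (0:Int))).items
                = answer.items ++ [(aWeaponList.getD c "", ((0:Int), (0:Int)))] :=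
            PySem.Dict.items_insert_of_not_contains _ _ hcontains
          have hkeys2 : ∀ k ∈ (answer.insert (aWeaponList.getD c "") ((0:Int), (0:Int))).keys,
              k ∈ aWeaponList.take (c+1) := by
            intro k hk
            rw [weapon_take c hc8]
            rcases (PySem.Dict.mem_keys_insert _ _ _ _).mp hk with h | h
            · simp [h]
            · exact List.mem_append_left _ (hkeys k h)
          simp only [aLoop, PySem.List.pyGetD_natCast, if_pos hgi, Bool.false_eq_true, if_false,
            if_pos hz]
          rw [e1, e2, IH fa' (by omega) (i+1) (c+1) _ (by omega) hkeys2 (by rw [hP] at hc; simp at hc; omega)]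
          rw [hins, weapon_drop c hc8, hP]
          simp
        · -- used weapon: record the pair, skip the next index (advance two)
          cases fa' with
          | zero => omega
          | succ fa'' =>
            have hP : parseFrom stats i = (stats.getD i 0, stats.getD (i+1) 0) :: parseFrom stats (i+2) := by
              unfold parseFrom
              rw [hparse, parse_pair _ _ _ hz]
            have e2 : (c : Int) + 1 = ((c + 1 : Nat) : Int) := by push_cast; ring
            have hins :
                (answer.insert (aWeaponList.getD c "") (stats.getD i 0, stats.getD (i+1) 0)).items
                  = answer.items ++ [(aWeaponList.getD c "", (stats.getD i 0, stats.getD (i+1) 0))] :=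
              PySem.Dict.items_insert_of_not_contains _ _ hcontains
            have hkeys2 : ∀ k ∈ (answer.insert (aWeaponList.getD c "") (stats.getD i 0, stats.getD (i+1) 0)).keys,
                k ∈ aWeaponList.take (c+1) := by
              intro k hk
              rw [weapon_take c hc8]
              rcases (PySem.Dict.mem_keys_insert _ _ _ _).mp hk with h | h
              · simp [h]
              · exact List.mem_append_left _ (hkeys k h)
            simp only [aLoop, if_pos hgi, Bool.false_eq_true, if_false]
            rw [show ((i : Int) + 1) = ((i + 1 : Nat) : Int) from by push_cast; ring]
            simp only [PySem.List.pyGetD_natCast]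
            rw [if_neg hz, if_pos (show True from trivial)]
            by_cases hg2 : ((i + 1 : Nat) : Int) < PySem.List.len stats - 1
            · rw [if_pos hg2,
                show (((i + 1 : Nat) : Int) + 1) = ((i + 2 : Nat) : Int) from by push_cast; ring, e2]
              rw [IH fa'' (by omega) (i+2) (c+1) _ (by omega) hkeys2 (by rw [hP] at hc; simp at hc; omega)]
              rw [hins, weapon_drop c hc8, hP]
              simp
            · rw [if_neg hg2]
              have hlen : stats.length = i + 2 := by
                simp only [PySem.List.len_eq] at hg2; omega
              have hP2 : parseFrom stats (i+2) = [] := by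
                unfold parseFrom
                rw [List.drop_eq_nil_of_le (by omega)]
                rfl
              rw [hins, weapon_drop c hc8, hP, hP2]
              simp
    · -- loop over: A's guard fails, B's parse from i is empty
      have hg' : ¬ ((i : Int) < PySem.List.len stats - 1) := by
        simp only [PySem.List.len_eq]; omega
      have hP : parseFrom stats i = [] := by
        unfold parseFrom
        exact parse_short _ (by simp; omega)
      cases fa with
      | zero => simp [aLoop, hP]
      | succ fa' =>
        conv_lhs => rw [aLoop]
        rw [if_neg hg']
        simp [hP]

-- ===== VERDICT (by name: the statement is the Claim_ definition above) =====
theorem get_player_stats_spec : Claim_equal_get_player_stats := by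
  intro stats _hdom hpre
  unfold Spec_get_player_stats get_player_stats get_player_stats_alt
  have hlen : (parseFrom stats 0).length ≤ 8 := by
    rw [parseFrom_length]
    simpa using hpre
  have h := aLoop_items stats stats.length 0 0 PySem.Dict.empty
    (by omega) (by simp [PySem.Dict.keys_empty]) (by omega)
  simp only [parseFrom, List.drop_zero] at h
  simpa [aWeaponList, bWeaponList] using h
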